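-- pv_equiv track=rewrite | github.com/MahmutSibal/EntropyHub- | api/main.py | _is_public_path
-- ===== SOURCE A (Python) =====
-- def _is_public_path(path: str, method: str, public_patterns: list[str]) -> bool:
--     if method == "OPTIONS":
--         return True
--     for pattern in public_patterns:
--         if pattern.endswith("*"):
--             if path.startswith(pattern[:-1]):
--                 return True
--         elif path == pattern:
--             return True
--     return False
-- ===== SOURCE B (Python) =====
-- def _is_public_path(path: str, method: str, public_patterns: list[str]) -> bool:
--     if method == "OPTIONS":
--         return True
--     # Invert the matching: index the patterns in a set, then probe it with the
--     # candidate strings that could match this path — the path itself, and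
--     # path[:i] + "*" for each prefix length i that a wildcard pattern actually has.
--     pats = set(public_patterns)
--     if path in pats:
--         return True
--     lengths = {len(q) - 1 for q in pats if q.endswith("*")}
--     return any(path[:i] + "*" in pats for i in lengths)
-- ===== Notes on version B (the rewrite author's own statement) =====
-- stated objective: alternative
-- what changed: B inverts the matching direction: it indexes the patterns in a set and probes that set with candidate strings derived from the path (the path itself, plus path[:i]+'*' for each body length i that occurs among the wildcard patterns), instead of scanning the patterns and testing the path against each one.
import Mathlib
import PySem

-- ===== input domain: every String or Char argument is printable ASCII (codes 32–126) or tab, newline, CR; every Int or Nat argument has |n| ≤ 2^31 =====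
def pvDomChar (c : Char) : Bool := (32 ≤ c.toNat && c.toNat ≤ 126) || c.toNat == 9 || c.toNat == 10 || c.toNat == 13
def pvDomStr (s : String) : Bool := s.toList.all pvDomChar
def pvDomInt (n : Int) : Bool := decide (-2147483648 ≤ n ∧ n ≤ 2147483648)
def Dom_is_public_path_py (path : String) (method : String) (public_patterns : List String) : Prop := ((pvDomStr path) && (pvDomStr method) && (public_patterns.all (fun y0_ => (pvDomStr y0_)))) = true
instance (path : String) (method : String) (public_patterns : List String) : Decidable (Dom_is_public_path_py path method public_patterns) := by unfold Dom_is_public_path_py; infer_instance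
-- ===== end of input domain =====

-- B inverts the matching: it indexes the patterns in a set and probes it with the
-- candidate strings that could match the path (the path itself, and path[:i] + "*" for
-- each body length i occurring among the wildcard patterns) — instead of testing the
-- path against each pattern in turn (alternative decomposition; same result).

-- ===== PORT A =====
-- the 'for pattern in public_patterns' loop with early returns
def pvALoop (path : String) (pats : List String) : Bool :=
  match pats with
  | [] => false
  | pattern :: rest =>
    if PySem.Str.endswith pattern "*" then
      if PySem.Str.startswith path (PySem.Str.slice pattern none (some (-1))) then true
      else pvALoop path rest
    else if path == pattern then true
    else pvALoop path rest

def is_public_path_py (path : String) (method : String) (public_patterns : List String) : Bool :=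
  if method == "OPTIONS" then true
  else pvALoop path public_patterns

-- ===== PORT B =====
-- pats = set(public_patterns); lengths = {len(q)-1 for q in pats if q.endswith("*")}
def pvLengths (pats : PySem.Set String) : PySem.Set Int :=
  PySem.Set.ofList ((pats.filter (fun q => PySem.Str.endswith q "*")).map
    (fun q => PySem.Str.len q - 1))

-- path[:i] + "*"  (string concatenation is exact on code points: String.ofList (chars ++ ['*']))
def pvCandidate (path : String) (i : Int) : String :=
  String.ofList ((PySem.Str.slice path none (some i)).toList ++ ['*'])

def is_public_path_py_alt (path : String) (method : String) (public_patterns : List String) : Bool :=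
  if method == "OPTIONS" then true
  else
    let pats := PySem.Set.ofList public_patterns
    if PySem.Set.contains pats path then true
    else (pvLengths pats).any (fun i => PySem.Set.contains pats (pvCandidate path i))

-- ===== PRECONDITION & SPEC =====
def Spec_is_public_path_py (path : String) (method : String) (public_patterns : List String) (out : Bool) : Prop := out = is_public_path_py_alt path method public_patterns
instance (path : String) (method : String) (public_patterns : List String) (out : Bool) : Decidable (Spec_is_public_path_py path method public_patterns out) := by unfold Spec_is_public_path_py; infer_instance

-- ===== CLAIM (what is proved, stated in full; the proofs are below) =====
def Claim_equal_is_public_path_py : Prop := ∀ (path : String) (method : String) (public_patterns : List String), Dom_is_public_path_py path method public_patterns → Spec_is_public_path_py path method public_patterns (is_public_path_py path method public_patterns)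

-- ===== LEMMAS AND PROOFS =====

-- the per-pattern predicate A's loop body tests
def pvHit (path pattern : String) : Bool :=
  if PySem.Str.endswith pattern "*" then
    PySem.Str.startswith path (PySem.Str.slice pattern none (some (-1)))
  else path == pattern

theorem pvALoop_eq_any (path : String) (pats : List String) :
    pvALoop path pats = pats.any (pvHit path) := by
  induction pats with
  | nil => rfl
  | cons pattern rest ih =>
    simp only [pvALoop, List.any_cons, pvHit]
    by_cases h : PySem.Str.endswith pattern "*" = true
    · simp only [if_pos h]
      cases hs : PySem.Str.startswith path (PySem.Str.slice pattern none (some (-1))) <;>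
        simp [ih]
    · simp only [if_neg h]
      cases he : (path == pattern) <;> simp [ih]

theorem pv_contains_ofList (ps : List String) (x : String) :
    PySem.Set.contains (PySem.Set.ofList ps) x = true ↔ x ∈ ps := by
  simp [PySem.Set.contains, PySem.Set.mem_ofList]

-- a string ending in '*' is its dropLast followed by '*'
theorem pv_star_split (p : String) (h : PySem.Str.endswith p "*" = true) :
    p.toList = p.toList.dropLast ++ ['*'] := by
  rw [PySem.Str.endswith_eq] at h
  rw [PySem.Chars.endswith_iff] at h
  obtain ⟨t, ht⟩ := h
  have : ("*" : String).toList = ['*'] := by decide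
  rw [this] at ht
  rw [← ht, List.dropLast_concat]

-- every pattern matches itself
theorem pv_hit_self (path : String) : pvHit path path = true := by
  unfold pvHit
  by_cases h : PySem.Str.endswith path "*" = true
  · rw [if_pos h, PySem.Str.startswith_eq, PySem.Chars.startswith_iff,
      PySem.Str.slice_to_neg_one]
    exact List.dropLast_prefix _
  · rw [if_neg h]; simp

-- every candidate path[:i] + "*" (i ≥ 0) matches the path
theorem pv_hit_candidate (path : String) (i : Int) (hi : 0 ≤ i) :
    pvHit path (pvCandidate path i) = true := by
  unfold pvHit pvCandidate
  have htl : (String.ofList ((PySem.Str.slice path none (some i)).toList ++ ['*'])).toList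
      = path.toList.take i.toNat ++ ['*'] := by
    simp only [String.toList_ofList, PySem.Str.toList_slice, PySem.Chars.slice_eq_listSlice]
    rw [PySem.List.slice_to path.toList hi]
  have hend : PySem.Str.endswith (String.ofList ((PySem.Str.slice path none (some i)).toList ++ ['*'])) "*" = true := by
    rw [PySem.Str.endswith_eq, PySem.Chars.endswith_iff, htl]
    have : ("*" : String).toList = ['*'] := by decide
    rw [this]; exact List.suffix_append _ _
  rw [if_pos hend, PySem.Str.startswith_eq, PySem.Chars.startswith_iff,
    PySem.Str.slice_to_neg_one, htl, List.dropLast_concat]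
  exact List.take_prefix _ _

-- a wildcard pattern that matches IS the candidate of its own body length
theorem pv_candidate_of_hit (path q : String)
    (hend : PySem.Str.endswith q "*" = true)
    (hsw : PySem.Str.startswith path (PySem.Str.slice q none (some (-1))) = true) :
    pvCandidate path (PySem.Str.len q - 1) = q := by
  rw [PySem.Str.startswith_eq, PySem.Chars.startswith_iff,
    PySem.Str.slice_to_neg_one] at hsw
  have hsplit := pv_star_split q hend
  have hlen : PySem.Str.len q - 1 = (q.toList.dropLast.length : Int) := by
    rw [PySem.Str.len_eq, hsplit]
    simp
  have htake : q.toList.dropLast = path.toList.take q.toList.dropLast.length :=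
    List.prefix_iff_eq_take.mp hsw
  unfold pvCandidate
  rw [String.ext_iff]
  simp only [String.toList_ofList, PySem.Str.toList_slice, PySem.Chars.slice_eq_listSlice, hlen]
  rw [PySem.List.slice_to_natCast path.toList q.toList.dropLast.length]
  rw [← htake, ← hsplit]

-- the body length of a wildcard pattern is nonnegative
theorem pv_len_sub_one_nonneg (q : String) (hend : PySem.Str.endswith q "*" = true) :
    0 ≤ PySem.Str.len q - 1 := by
  have hsplit := pv_star_split q hend
  rw [PySem.Str.len_eq, hsplit]
  simp

-- membership in B's length set
theorem pv_mem_lengths (ps : List String) (i : Int) :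
    i ∈ pvLengths (PySem.Set.ofList ps)
      ↔ ∃ q ∈ ps, PySem.Str.endswith q "*" = true ∧ i = PySem.Str.len q - 1 := by
  unfold pvLengths
  rw [PySem.Set.mem_ofList]
  simp only [List.mem_map, List.mem_filter]
  constructor
  · rintro ⟨q, ⟨hq, he⟩, rfl⟩
    exact ⟨q, (PySem.Set.mem_ofList ps q).mp hq, he, rfl⟩
  · rintro ⟨q, hq, he, rfl⟩
    exact ⟨q, ⟨(PySem.Set.mem_ofList ps q).mpr hq, he⟩, rfl⟩

-- B's body computes A's loop result
theorem pv_alt_eq_any (path : String) (ps : List String) :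
    (if PySem.Set.contains (PySem.Set.ofList ps) path then true
     else (pvLengths (PySem.Set.ofList ps)).any
       (fun i => PySem.Set.contains (PySem.Set.ofList ps) (pvCandidate path i)))
    = ps.any (pvHit path) := by
  rw [Bool.eq_iff_iff]
  by_cases hc : PySem.Set.contains (PySem.Set.ofList ps) path = true
  · rw [if_pos hc]
    simp only [true_iff, List.any_eq_true]
    exact ⟨path, (pv_contains_ofList ps path).mp hc, pv_hit_self path⟩
  · rw [if_neg hc]
    simp only [List.any_eq_true]
    constructor
    · rintro ⟨i, hiL, hic⟩
      obtain ⟨q, _, hqe, rfl⟩ := (pv_mem_lengths ps i).mp hiL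
      exact ⟨pvCandidate path (PySem.Str.len q - 1),
        (pv_contains_ofList ps _).mp hic,
        pv_hit_candidate path _ (pv_len_sub_one_nonneg q hqe)⟩
    · rintro ⟨q, hq, hhit⟩
      unfold pvHit at hhit
      by_cases hend : PySem.Str.endswith q "*" = true
      · rw [if_pos hend] at hhit
        refine ⟨PySem.Str.len q - 1, (pv_mem_lengths ps _).mpr ⟨q, hq, hend, rfl⟩, ?_⟩
        rw [pv_candidate_of_hit path q hend hhit]
        exact (pv_contains_ofList ps q).mpr hq
      · rw [if_neg hend] at hhit
        exact absurd ((pv_contains_ofList ps path).mpr ((eq_of_beq hhit) ▸ hq)) hc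

-- ===== VERDICT (by name: the statement is the Claim_ definition above) =====
theorem is_public_path_py_spec : Claim_equal_is_public_path_py := by
  intro path method pats _
  unfold Spec_is_public_path_py is_public_path_py is_public_path_py_alt
  by_cases h : (method == "OPTIONS") = true
  · simp [h]
  · simp only [h, if_neg, Bool.false_eq_true, not_false_iff]
    rw [pvALoop_eq_any]
    exact (pv_alt_eq_any path pats).symm
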